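-- pv_equiv track=rewrite | github.com/Pranav322/deepdoc | deepdoc/chatbot/answer_mixin.py | _merge_continuation
-- ===== SOURCE A (Python) =====
-- def _merge_continuation(existing: str, continuation: str) -> str:
--     left = existing.rstrip()
--     right = continuation.strip()
--     if not right:
--         return left
--     if right in left:
--         return left
--
--     left_lower = left.lower()
--     right_lower = right.lower()
--     overlap = 0
--     max_overlap = min(len(left_lower), len(right_lower), 800)
--     for size in range(max_overlap, 39, -1):
--         if left_lower.endswith(right_lower[:size]):
--             overlap = size
--             break
--
--     if overlap:
--         right = right[overlap:].lstrip()
--         if not right: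
--             return left
--     return f"{left}\n\n{right}"
-- ===== SOURCE B (Python) =====
-- def _merge_continuation(existing: str, continuation: str) -> str:
--     left = existing.rstrip()
--     right = continuation.strip()
--     if not right:
--         return left
--     if right in left:
--         return left
--
--     ll = left.lower()
--     rl = right.lower()
--     n = len(ll)
--     m = min(n, len(rl), 800)
--     if m >= 40:
--         # Anchor search: any admissible overlap (>= 40 chars) must place the
--         # first 40 lowered chars of right somewhere in left's tail; use the
--         # substring-search primitive to jump between anchor occurrences and
--         # verify only those alignments, instead of testing every size.
--         anchor = rl[:40]
--         overlap = _scan(ll, rl, anchor, ll.find(anchor, n - m))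
--     else:
--         overlap = 0
--
--     if overlap:
--         right = right[overlap:].lstrip()
--         if not right:
--             return left
--     return f"{left}\n\n{right}"
--
--
-- def _scan(ll, rl, anchor, p):
--     n = len(ll)
--     while 0 <= p <= n - 40:
--         if rl.startswith(ll[p:]):
--             return n - p
--         q = ll.find(anchor, p + 1)
--         if q == -1:
--             return 0
--         p = q
--     return 0
-- ===== Notes on version B (the rewrite author's own statement) =====
-- stated objective: alternative
-- what changed: A tests every candidate overlap size 800..40 with endswith; B instead anchors on the first 40 lowered chars of right and uses the substring-search primitive str.find to jump directly between anchor occurrences in left's tail, verifying the full suffix/prefix match only at those alignments (guards and glue unchanged).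
import Mathlib
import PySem

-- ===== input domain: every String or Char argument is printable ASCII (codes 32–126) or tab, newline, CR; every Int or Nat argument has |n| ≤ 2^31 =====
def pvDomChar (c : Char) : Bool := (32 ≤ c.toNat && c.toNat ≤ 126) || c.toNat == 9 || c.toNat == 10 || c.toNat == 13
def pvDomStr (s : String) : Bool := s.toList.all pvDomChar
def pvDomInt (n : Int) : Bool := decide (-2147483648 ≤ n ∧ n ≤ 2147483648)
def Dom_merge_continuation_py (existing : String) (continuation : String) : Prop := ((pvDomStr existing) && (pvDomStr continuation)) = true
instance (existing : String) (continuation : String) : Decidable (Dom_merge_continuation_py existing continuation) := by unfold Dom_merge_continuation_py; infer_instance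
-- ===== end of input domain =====

-- B replaces A's descending endswith-size scan by an anchor search: it locates
-- occurrences of the first 40 lowered chars of right in left's tail with the
-- substring-search primitive (findFrom) and verifies the full overlap only at
-- those alignments — an alternative algorithm proved to give the same merge.


-- ===== PORT A =====
-- Literal transliteration of _merge_continuation: descending loop over overlap sizes,
-- first size whose lowered right-prefix ends the lowered left wins (find? = loop+break).
def merge_continuation_py (existing : String) (continuation : String) : String :=
  let left := PySem.Str.rstrip existing
  let right := PySem.Str.strip continuation
  if PySem.Str.len right = 0 then left
  else if PySem.Str.isIn right left then left
  else
    let left_lower := PySem.Str.lower left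
    let right_lower := PySem.Str.lower right
    let max_overlap : Int := min (min (PySem.Str.len left_lower) (PySem.Str.len right_lower)) 800
    let overlap : Int :=
      ((PySem.List.pyRange max_overlap 39 (-1)).find? (fun size =>
        PySem.Str.endswith left_lower (PySem.Str.slice right_lower none (some size)))).getD 0
    if overlap ≠ 0 then
      let right2 := PySem.Str.lstrip (PySem.Str.slice right (some overlap) none)
      if PySem.Str.len right2 = 0 then left
      else left ++ "\n\n" ++ right2
    else left ++ "\n\n" ++ right

-- ===== PORT B =====
-- Transliteration of Source B's _scan: while loop over anchor occurrences (fuel only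
-- makes the recursion total; each step strictly increases p, so fuel never runs out).
def pvScan (ll rl anchor : List Char) (fuel : Nat) (p : Int) : Int :=
  match fuel with
  | 0 => 0
  | fuel + 1 =>
    if 0 ≤ p ∧ p ≤ (ll.length : Int) - 40 then
      if PySem.Chars.startswith rl (PySem.List.slice ll (some p) none) then (ll.length : Int) - p
      else
        let q := PySem.Chars.findFrom ll anchor (p + 1) none
        if q = -1 then 0 else pvScan ll rl anchor fuel q
    else 0

-- Transliteration of Source B: anchor = rl[:40]; jump between its occurrences with find.
def merge_continuation_py_alt (existing : String) (continuation : String) : String :=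
  let left := PySem.Str.rstrip existing
  let right := PySem.Str.strip continuation
  if PySem.Str.len right = 0 then left
  else if PySem.Str.isIn right left then left
  else
    let ll : List Char := (PySem.Str.lower left).toList
    let rl : List Char := (PySem.Str.lower right).toList
    let n : Int := (ll.length : Int)
    let m : Int := min (min n (rl.length : Int)) 800
    let overlap : Int :=
      if 40 ≤ m then
        let anchor := PySem.List.slice rl none (some 40)
        pvScan ll rl anchor (n.toNat + 1) (PySem.Chars.findFrom ll anchor (n - m) none)
      else 0
    if overlap ≠ 0 then
      let right2 := PySem.Str.lstrip (PySem.Str.slice right (some overlap) none)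
      if PySem.Str.len right2 = 0 then left
      else left ++ "\n\n" ++ right2
    else left ++ "\n\n" ++ right

-- ===== PRECONDITION & SPEC =====
def Spec_merge_continuation_py (existing : String) (continuation : String) (out : String) : Prop := out = merge_continuation_py_alt existing continuation
instance (existing : String) (continuation : String) (out : String) : Decidable (Spec_merge_continuation_py existing continuation out) := by unfold Spec_merge_continuation_py; infer_instance

-- ===== CLAIM (what is proved, stated in full; the proofs are below) =====
def Claim_equal_merge_continuation_py : Prop := ∀ (existing : String) (continuation : String), Dom_merge_continuation_py existing continuation → Spec_merge_continuation_py existing continuation (merge_continuation_py existing continuation)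

-- ===== LEMMAS AND PROOFS =====

-- the first 40 chars of R start every prefix of R that is at least 40 long
theorem pv_take40_of_prefix (u R : List Char) (h : u <+: R) (hlen : 40 ≤ u.length) :
    R.take 40 <+: u := by
  obtain ⟨t, rfl⟩ := h
  rw [List.take_append]
  have h0 : 40 - u.length = 0 := by omega
  rw [h0]
  simpa using List.take_prefix 40 u

-- a full overlap at position j (at least 40 chars) puts the anchor at j
theorem pv_anchor_of_full (L R : List Char) (j : Nat) (hj : j + 40 ≤ L.length)
    (h : L.drop j <+: R) : R.take 40 <+: L.drop j := by
  apply pv_take40_of_prefix _ _ h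
  simp only [List.length_drop]
  omega

-- a suffix of L of length s is a prefix of R  ↔  the length-s prefix of R is a suffix of L
theorem pv_drop_prefix_iff_take_suffix (L R : List Char) (q s : Nat)
    (hqs : q + s = L.length) (hsR : s ≤ R.length) :
    (L.drop q <+: R) ↔ (R.take s <:+ L) := by
  constructor
  · intro h
    have hlen : (L.drop q).length = s := by simp [List.length_drop]; omega
    have he : L.drop q = R.take s := by
      have h2 := List.prefix_iff_eq_take.mp h
      rw [hlen] at h2
      exact h2
    rw [← he]
    exact List.drop_suffix q L
  · intro h
    have hlen : (R.take s).length = s := by simp [List.length_take]; omega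
    have he : R.take s = L.drop q := by
      have h2 := List.suffix_iff_eq_drop.mp h
      rw [hlen] at h2
      have hq : L.length - s = q := by omega
      rw [hq] at h2
      exact h2
    rw [← he]
    exact List.take_prefix s R

-- skipping an all-false initial segment of an ascending range does not change find?
theorem pv_find?_pyRange_skip (P : Int → Bool) (a b c : Int) (hab : a ≤ b)
    (h : ∀ j, a ≤ j → j < b → j < c → P j = false) :
    (PySem.List.pyRange a c).find? P = (PySem.List.pyRange b c).find? P := by
  by_cases hbc : b ≤ c
  · rw [PySem.List.pyRange_one_append a b c hab hbc, List.find?_append]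
    have h1 : (PySem.List.pyRange a b).find? P = none := by
      rw [List.find?_eq_none]
      intro x hx
      have hm := PySem.List.mem_pyRange_one.mp hx
      simp [h x hm.1 hm.2 (by omega)]
    rw [h1, Option.none_or]
  · have h2 : PySem.List.pyRange b c = [] := by
      rw [PySem.List.pyRange_one]
      have : (c - b).toNat = 0 := by omega
      rw [this]; rfl
    have h1 : (PySem.List.pyRange a c).find? P = none := by
      rw [List.find?_eq_none]
      intro x hx
      have hm := PySem.List.mem_pyRange_one.mp hx
      simp [h x hm.1 (by omega) (by omega)]
    rw [h1, h2]; rfl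

-- loop correctness: pvScan returns n - (first full-overlap position ≥ p), else 0
theorem pv_scan_spec (L R : List Char) (fuel : Nat) (p : Int)
    (hp : 0 ≤ p) (hfuel : ((L.length : Int) - p).toNat < fuel) :
    pvScan L R (R.take 40) fuel p
      = (((PySem.List.pyRange p ((L.length : Int) - 39)).find?
          (fun j => PySem.Chars.startswith R (PySem.List.slice L (some j) none))).map
          (fun j => (L.length : Int) - j)).getD 0 := by
  induction fuel generalizing p with
  | zero => omega
  | succ fuel ih =>
    by_cases hrange : p ≤ (L.length : Int) - 40
    · by_cases hFull : PySem.Chars.startswith R (PySem.List.slice L (some p) none) = true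
      · -- found at p
        rw [PySem.List.pyRange_one_cons (show p < (L.length : Int) - 39 by omega)]
        simp [pvScan, hp, hrange, hFull]
      · -- not full at p: peel p, then jump via findFrom
        have hBf : PySem.Chars.startswith R (PySem.List.slice L (some p) none) = false := by
          simpa using hFull
        have hk : p.toNat + 1 ≤ L.length := by omega
        have hcast : (p + 1 : Int) = ((p.toNat + 1 : Nat) : Int) := by omega
        -- any full overlap at j ≤ n - 40 has the anchor at j
        have hanchor : ∀ j : Int, 0 ≤ j → j ≤ (L.length : Int) - 40 →
            PySem.Chars.startswith R (PySem.List.slice L (some j) none) = true →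
            R.take 40 <+: L.drop j.toNat := by
          intro j hj0 hj1 hFullj
          rw [PySem.List.slice_from L hj0, PySem.Chars.startswith_iff] at hFullj
          exact pv_anchor_of_full L R j.toNat (by omega) hFullj
        by_cases hqneg : PySem.Chars.findFrom L (R.take 40) (p + 1) none = -1
        · -- no anchor past p: nothing full past p either
          have hno : ¬ (R.take 40) <:+: L.drop (p.toNat + 1) :=
            (PySem.Chars.findFrom_natCast_eq_neg_one_iff L (R.take 40) (p.toNat + 1) hk).mp
              (by rw [← hcast]; exact hqneg)
          have hzero : (PySem.List.pyRange p ((L.length : Int) - 39)).find?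
              (fun j => PySem.Chars.startswith R (PySem.List.slice L (some j) none)) = none := by
            rw [List.find?_eq_none]
            intro x hx
            have hm := PySem.List.mem_pyRange_one.mp hx
            show ¬ PySem.Chars.startswith R (PySem.List.slice L (some x) none) = true
            rcases eq_or_lt_of_le hm.1 with heq | hlt
            · rw [← heq, hBf]; simp
            · intro hcon
              have hpre := hanchor x (by omega) (by omega) hcon
              have hdd : L.drop x.toNat = (L.drop (p.toNat + 1)).drop (x.toNat - (p.toNat + 1)) := by
                rw [List.drop_drop]; congr 1; omega
              apply hno
              refine List.IsInfix.trans hpre.isInfix ?_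
              rw [hdd]
              exact (List.drop_suffix _ _).isInfix
          rw [hzero]
          simp [pvScan, hp, hrange, hBf, hqneg]
        · -- anchor found at q: skip to q
          have hspec := PySem.Chars.findFrom_natCast_spec L (R.take 40) (p.toNat + 1) hk
          rw [← hcast] at hspec
          obtain ⟨hqge, hqpre, hqmin⟩ := hspec hqneg
          have hq0 : 0 ≤ PySem.Chars.findFrom L (R.take 40) (p + 1) none := by omega
          have hskip : (PySem.List.pyRange (p + 1) ((L.length : Int) - 39)).find?
                (fun j => PySem.Chars.startswith R (PySem.List.slice L (some j) none))
              = (PySem.List.pyRange (PySem.Chars.findFrom L (R.take 40) (p + 1) none)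
                  ((L.length : Int) - 39)).find?
                (fun j => PySem.Chars.startswith R (PySem.List.slice L (some j) none)) := by
            apply pv_find?_pyRange_skip _ _ _ _ (by omega)
            intro j hj1 hj2 hj3
            by_contra hcon
            rw [Bool.not_eq_false] at hcon
            have hpre := hanchor j (by omega) (by omega) hcon
            have hdd : L.drop j.toNat = L.drop j.toNat := rfl
            exact hqmin j.toNat (by omega) (by omega) hpre
          have hlen : PySem.Chars.findFrom L (R.take 40) (p + 1) none ≤ (L.length : Int) := by
            have := PySem.Chars.findFrom_natCast L (R.take 40) (p.toNat + 1) hk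
            rw [← hcast] at this
            rw [this]
            have h1 := PySem.Chars.neg_one_le_find (L.drop (p.toNat + 1)) (R.take 40)
            have h2 := PySem.Chars.find_le_length (L.drop (p.toNat + 1)) (R.take 40)
            simp only [List.length_drop] at h2
            split <;> omega
          have hfuel' : ((L.length : Int) - PySem.Chars.findFrom L (R.take 40) (p + 1) none).toNat < fuel := by
            omega
          have hstep : pvScan L R (R.take 40) (fuel + 1) p
              = pvScan L R (R.take 40) fuel (PySem.Chars.findFrom L (R.take 40) (p + 1) none) := by
            simp [pvScan, hp, hrange, hBf, hqneg]
          rw [hstep, ih _ hq0 hfuel',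
            PySem.List.pyRange_one_cons (show p < (L.length : Int) - 39 by omega),
            List.find?_cons, hBf, hskip]
    · -- p out of range: empty candidate range
      have hempty : PySem.List.pyRange p ((L.length : Int) - 39) = [] := by
        rw [PySem.List.pyRange_one]
        have h0 : ((L.length : Int) - 39 - p).toNat = 0 := by omega
        rw [h0]; rfl
      rw [hempty]
      simp [pvScan, hrange]

-- the central equation: B's anchor loop equals A's descending size search
theorem pv_overlap_main (L R : List Char) :
    (if 40 ≤ min (min (L.length : Int) (R.length : Int)) 800 then
       pvScan L R (PySem.List.slice R none (some 40)) (((L.length : Int)).toNat + 1)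
         (PySem.Chars.findFrom L (PySem.List.slice R none (some 40))
           ((L.length : Int) - min (min (L.length : Int) (R.length : Int)) 800) none)
     else 0)
    = ((PySem.List.pyRange (min (min (L.length : Int) (R.length : Int)) 800) 39 (-1)).find?
        (fun s => PySem.Chars.endswith L (PySem.List.slice R none (some s)))).getD 0 := by
  have hA : PySem.List.slice R none (some 40) = R.take 40 := by
    rw [PySem.List.slice_to R (by norm_num)]; rfl
  set n : Int := (L.length : Int) with hn
  set M : Int := min (min n (R.length : Int)) 800 with hM
  have hM0 : 0 ≤ M := by omega
  have hMn : M ≤ n := by omega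
  have hMR : M ≤ (R.length : Int) := by omega
  by_cases h40 : 40 ≤ M
  · rw [if_pos h40, hA]
    -- RHS: descending sizes = ascending positions mapped through s = n - p
    have hmap : (PySem.List.pyRange (n - M) (n - 39)).map (fun p => n - p)
        = PySem.List.pyRange M 39 (-1) := by
      rw [PySem.List.pyRange_one, PySem.List.pyRange_neg_one, List.map_map]
      have he : (n - 39) - (n - M) = M - 39 := by ring
      rw [he]
      apply List.map_congr_left
      intro k _
      simp only [Function.comp]
      omega
    -- pointwise: P (n - p) = Full p on the position range
    have hpt : ∀ p ∈ PySem.List.pyRange (n - M) (n - 39),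
        ((fun s => PySem.Chars.endswith L (PySem.List.slice R none (some s))) ∘ (fun p => n - p)) p
          = PySem.Chars.startswith R (PySem.List.slice L (some p) none) := by
      intro p hp
      have hb := PySem.List.mem_pyRange_one.mp hp
      simp only [Function.comp]
      rw [PySem.List.slice_from L (show (0:Int) ≤ p by omega),
        PySem.List.slice_to R (show (0:Int) ≤ n - p by omega)]
      rw [Bool.eq_iff_iff, PySem.Chars.endswith_iff, PySem.Chars.startswith_iff]
      exact (pv_drop_prefix_iff_take_suffix L R p.toNat (n - p).toNat (by omega) (by omega)).symm
    have hRHS : ((PySem.List.pyRange M 39 (-1)).find?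
          (fun s => PySem.Chars.endswith L (PySem.List.slice R none (some s)))).getD 0
        = (((PySem.List.pyRange (n - M) (n - 39)).find?
            (fun j => PySem.Chars.startswith R (PySem.List.slice L (some j) none))).map
            (fun j => n - j)).getD 0 := by
      rw [← hmap, List.find?_map]
      congr 1
      rw [← List.head?_filter, ← List.head?_filter, List.filter_congr hpt]
    rw [hRHS]
    have hkM : (n - M).toNat ≤ L.length := by omega
    have hcastM : (n - M : Int) = (((n - M).toNat : Nat) : Int) := by omega
    by_cases h0 : PySem.Chars.findFrom L (R.take 40) (n - M) none = -1
    · -- no anchor at all in the candidate window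
      have hno : ¬ (R.take 40) <:+: L.drop (n - M).toNat :=
        (PySem.Chars.findFrom_natCast_eq_neg_one_iff L (R.take 40) ((n - M).toNat) hkM).mp
          (by rw [← hcastM]; exact h0)
      have hzero : (PySem.List.pyRange (n - M) (n - 39)).find?
          (fun j => PySem.Chars.startswith R (PySem.List.slice L (some j) none)) = none := by
        rw [List.find?_eq_none]
        intro x hx
        have hm := PySem.List.mem_pyRange_one.mp hx
        show ¬ PySem.Chars.startswith R (PySem.List.slice L (some x) none) = true
        intro hcon
        rw [PySem.List.slice_from L (show (0:Int) ≤ x by omega), PySem.Chars.startswith_iff] at hcon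
        have hpre := pv_anchor_of_full L R x.toNat (by omega) hcon
        apply hno
        refine List.IsInfix.trans hpre.isInfix ?_
        have hdd : L.drop x.toNat = (L.drop (n - M).toNat).drop (x.toNat - (n - M).toNat) := by
          rw [List.drop_drop]; congr 1; omega
        rw [hdd]
        exact (List.drop_suffix _ _).isInfix
      rw [hzero, h0]
      simp [pvScan]
    · -- anchor found: positions before it cannot carry a full overlap
      have hspec := PySem.Chars.findFrom_natCast_spec L (R.take 40) ((n - M).toNat) hkM
      rw [← hcastM] at hspec
      obtain ⟨hge, hpre0, hmin⟩ := hspec h0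
      have hp0 : 0 ≤ PySem.Chars.findFrom L (R.take 40) (n - M) none := by omega
      have hskip : (PySem.List.pyRange (n - M) (n - 39)).find?
            (fun j => PySem.Chars.startswith R (PySem.List.slice L (some j) none))
          = (PySem.List.pyRange (PySem.Chars.findFrom L (R.take 40) (n - M) none) (n - 39)).find?
            (fun j => PySem.Chars.startswith R (PySem.List.slice L (some j) none)) := by
        apply pv_find?_pyRange_skip _ _ _ _ (by omega)
        intro j hj1 hj2 hj3
        by_contra hcon
        rw [Bool.not_eq_false] at hcon
        rw [PySem.List.slice_from L (show (0:Int) ≤ j by omega), PySem.Chars.startswith_iff] at hcon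
        exact hmin j.toNat (by omega) (by omega) (pv_anchor_of_full L R j.toNat (by omega) hcon)
      have hlen : PySem.Chars.findFrom L (R.take 40) (n - M) none ≤ n := by
        have heq := PySem.Chars.findFrom_natCast L (R.take 40) ((n - M).toNat) hkM
        rw [← hcastM] at heq
        rw [heq]
        have h2 := PySem.Chars.find_le_length (L.drop (n - M).toNat) (R.take 40)
        simp only [List.length_drop] at h2
        split <;> omega
      rw [hskip, ← pv_scan_spec L R (n.toNat + 1) _ hp0 (by omega)]
  · rw [if_neg h40]
    have hempty : PySem.List.pyRange M 39 (-1) = [] := by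
      rw [PySem.List.pyRange_neg_one]
      have h0 : (M - 39).toNat = 0 := by omega
      rw [h0]; rfl
    rw [hempty]
    rfl

-- the same equation at String level (bridge Str → Chars → List)
theorem pv_overlap_str (ll rl : String) :
    (if 40 ≤ min (min ((ll.toList.length : Int)) ((rl.toList.length : Int))) 800 then
       pvScan ll.toList rl.toList (PySem.List.slice rl.toList none (some 40))
         (((ll.toList.length : Int)).toNat + 1)
         (PySem.Chars.findFrom ll.toList (PySem.List.slice rl.toList none (some 40))
           ((ll.toList.length : Int) - min (min ((ll.toList.length : Int)) ((rl.toList.length : Int))) 800) none)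
     else 0)
    = ((PySem.List.pyRange (min (min (PySem.Str.len ll) (PySem.Str.len rl)) 800) 39 (-1)).find?
        (fun s => PySem.Str.endswith ll (PySem.Str.slice rl none (some s)))).getD 0 := by
  simp only [PySem.Str.len_eq, PySem.Str.endswith_eq, PySem.Str.toList_slice,
    PySem.Chars.slice_eq_listSlice]
  exact pv_overlap_main ll.toList rl.toList

-- ===== VERDICT (by name: the statement is the Claim_ definition above) =====
theorem merge_continuation_py_spec : Claim_equal_merge_continuation_py := by
  intro existing continuation _
  unfold Spec_merge_continuation_py
  simp only [merge_continuation_py, merge_continuation_py_alt, PySem.Str.len_eq,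
    pv_overlap_str (PySem.Str.lower (PySem.Str.rstrip existing))
      (PySem.Str.lower (PySem.Str.strip continuation))]
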